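-- pv_equiv track=rewrite | github.com/S1gm0idCTF/CTF_Utility_Bot | cogs/piping.py | rot_p
-- ===== SOURCE A (Python) =====
-- import collections
-- import string
--
-- def rot_p(encode_or_decode,message):
-- 	allrot = ''
-- 	for i in range(0, 26):
-- 		upper = collections.deque(string.ascii_uppercase)
-- 		lower = collections.deque(string.ascii_lowercase)
-- 		upper.rotate((- i))
-- 		lower.rotate((- i))
--
-- 		upper = ''.join(list(upper))
-- 		lower = ''.join(list(lower))
-- 		translated = message.translate(str.maketrans(string.ascii_uppercase, upper)).translate(str.maketrans(string.ascii_lowercase, lower))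
-- 		allrot += '{}: {}\n'.format(i, translated)
-- 	return str(allrot)
-- ===== SOURCE B (Python) =====
-- def rot_p(encode_or_decode, message):
--     lines = []
--     for i in range(26):
--         translated = ''.join(
--             chr((ord(c) - 65 + i) % 26 + 65) if 'A' <= c <= 'Z'
--             else chr((ord(c) - 97 + i) % 26 + 97) if 'a' <= c <= 'z'
--             else c
--             for c in message)
--         lines.append('{}: {}\n'.format(i, translated))
--     return ''.join(lines)
-- ===== Notes on version B (the rewrite author's own statement) =====
-- stated objective: simpler
-- what changed: Replaces the per-shift deque rotations and maketrans translation tables with direct per-character modular ord-arithmetic, joining lines once at the end instead of repeated string concatenation.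
import Mathlib
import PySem

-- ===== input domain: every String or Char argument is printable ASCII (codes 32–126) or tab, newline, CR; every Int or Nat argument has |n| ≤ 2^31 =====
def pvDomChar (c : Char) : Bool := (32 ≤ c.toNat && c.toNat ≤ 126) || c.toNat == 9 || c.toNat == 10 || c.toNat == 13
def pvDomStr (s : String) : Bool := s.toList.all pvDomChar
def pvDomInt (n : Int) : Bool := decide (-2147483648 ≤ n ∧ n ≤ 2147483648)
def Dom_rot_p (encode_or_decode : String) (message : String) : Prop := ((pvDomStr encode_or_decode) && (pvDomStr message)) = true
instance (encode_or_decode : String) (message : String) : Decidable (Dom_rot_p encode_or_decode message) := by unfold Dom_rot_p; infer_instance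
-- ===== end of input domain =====

-- B replaces A's per-shift deque rotations and maketrans translation tables with direct
-- per-character modular ord-arithmetic and a single final join (objective: simpler).

-- ===== PORT A =====
def pvUpperAlpha : List Char := "ABCDEFGHIJKLMNOPQRSTUVWXYZ".toList
def pvLowerAlpha : List Char := "abcdefghijklmnopqrstuvwxyz".toList

-- str.translate with a str.maketrans(src, tgt) table: a char found in src maps to tgt at
-- the same index, any other char is unchanged (exact for these length-26 ASCII tables)
def pvTranslate (src tgt : List Char) (c : Char) : Char :=
  match src.findIdx? (· == c) with
  | some k => tgt.getD k c
  | none => c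

def rot_p (encode_or_decode : String) (message : String) : String :=
  String.mk ((PySem.List.pyRange 0 26 1).foldl (fun acc i =>
    -- collections.deque(alphabet).rotate(-i) for 0 ≤ i < 26: rotate left by i
    let upper := pvUpperAlpha.drop (i.toNat % 26) ++ pvUpperAlpha.take (i.toNat % 26)
    let lower := pvLowerAlpha.drop (i.toNat % 26) ++ pvLowerAlpha.take (i.toNat % 26)
    let translated := (message.toList.map (pvTranslate pvUpperAlpha upper)).map
                        (pvTranslate pvLowerAlpha lower)
    -- allrot += '{}: {}\n'.format(i, translated)
    acc ++ ((PySem.Int.toStr i).toList ++ (':' :: ' ' :: translated) ++ ['\n'])) [])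

-- ===== PORT B =====
-- per-character modular ord-arithmetic (Lean's Int % is emod = Python's % for divisor 26)
def pvShift (i : Int) (c : Char) : Char :=
  if 'A' ≤ c ∧ c ≤ 'Z' then Char.ofNat ((((c.toNat : Int) - 65 + i) % 26 + 65).toNat)
  else if 'a' ≤ c ∧ c ≤ 'z' then Char.ofNat ((((c.toNat : Int) - 97 + i) % 26 + 97).toNat)
  else c

def rot_p_alt (encode_or_decode : String) (message : String) : String :=
  -- ''.join(lines) where lines[i] = '{}: {}\n'.format(i, per-char shifted message)
  String.mk (((PySem.List.pyRange 0 26 1).map (fun i =>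
    (PySem.Int.toStr i).toList ++ (':' :: ' ' :: message.toList.map (pvShift i)) ++ ['\n'])).flatten)

-- ===== PRECONDITION & SPEC =====
def Spec_rot_p (encode_or_decode : String) (message : String) (out : String) : Prop := out = rot_p_alt encode_or_decode message
instance (encode_or_decode : String) (message : String) (out : String) : Decidable (Spec_rot_p encode_or_decode message out) := by unfold Spec_rot_p; infer_instance

-- ===== CLAIM (what is proved, stated in full; the proofs are below) =====
def Claim_equal_rot_p : Prop := ∀ (encode_or_decode : String) (message : String), Dom_rot_p encode_or_decode message → Spec_rot_p encode_or_decode message (rot_p encode_or_decode message)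

-- ===== LEMMAS AND PROOFS =====

-- the two translate passes agree with the arithmetic shift on every domain character, for every shift
set_option maxRecDepth 40000 in
set_option maxHeartbeats 4000000 in
theorem pv_char_key : ∀ n < 127, ∀ k < 26,
    pvTranslate pvLowerAlpha
        (pvLowerAlpha.drop (k % 26) ++ pvLowerAlpha.take (k % 26))
        (pvTranslate pvUpperAlpha
          (pvUpperAlpha.drop (k % 26) ++ pvUpperAlpha.take (k % 26)) (Char.ofNat n))
      = pvShift (k : Int) (Char.ofNat n) := by decide

theorem pv_range_bounds : ∀ i ∈ PySem.List.pyRange 0 26 1, 0 ≤ i ∧ i < 26 := by decide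

theorem pv_line_eq (message : String) (hm : pvDomStr message = true)
    (i : Int) (hi : i ∈ PySem.List.pyRange 0 26 1) :
    (PySem.Int.toStr i).toList ++
      (':' :: ' ' ::
        (message.toList.map (pvTranslate pvUpperAlpha
            (pvUpperAlpha.drop (i.toNat % 26) ++ pvUpperAlpha.take (i.toNat % 26)))).map
          (pvTranslate pvLowerAlpha
            (pvLowerAlpha.drop (i.toNat % 26) ++ pvLowerAlpha.take (i.toNat % 26)))) ++ ['\n']
    = (PySem.Int.toStr i).toList ++ (':' :: ' ' :: message.toList.map (pvShift i)) ++ ['\n'] := by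
  obtain ⟨h0, h26⟩ := pv_range_bounds i hi
  have hi' : (i.toNat : Int) = i := Int.toNat_of_nonneg h0
  congr 2
  congr 1
  congr 1
  rw [List.map_map]
  apply List.map_congr_left
  intro c hc
  have hdom : pvDomChar c = true := by
    have := List.all_eq_true.mp hm c hc
    exact this
  have hn : c.toNat < 127 := by
    unfold pvDomChar at hdom
    simp only [Bool.or_eq_true, Bool.and_eq_true, decide_eq_true_eq, beq_iff_eq] at hdom
    omega
  have hk : i.toNat < 26 := by omega
  have := pv_char_key c.toNat hn i.toNat hk
  rw [Char.ofNat_toNat] at this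
  rw [hi'] at this
  exact this

-- ===== VERDICT (by name: the statement is the Claim_ definition above) =====
theorem rot_p_spec : Claim_equal_rot_p := by
  intro e m hdom
  unfold Spec_rot_p rot_p rot_p_alt
  have hm : pvDomStr m = true := by
    unfold Dom_rot_p at hdom
    simp only [Bool.and_eq_true] at hdom
    exact hdom.2
  rw [PySem.List.foldl_append_eq_flatMap, List.flatMap_def, List.nil_append]
  congr 1
  congr 1
  apply List.map_congr_left
  intro i hi
  exact pv_line_eq m hm i hi
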